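-- pv_equiv track=rewrite | github.com/NNIIGGEE/DSA4263_T00 | notebooks/preprocessing.py | remove_punctuation_word
-- ===== SOURCE A (Python) =====
-- import string
--
-- def remove_punctuation_word(word):
--     '''
--     Parameters
--     ----------
--     words : Takes in a single token.
--
--     Returns
--     -------
--     new_list : Returns token without any special characters contained in it, excluding words with hyphen in between.
--
--     '''
--     lst = []
--     corrected_word=""
--     for i, char in enumerate(word):
--         if (i!=0 and i!=(len(word)-1) and char == '-' and (word[i+1] not in string.punctuation) and (word[i-1] not in string.punctuation)):
--             corrected_word+=char
--
--         elif char in string.punctuation: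
--             lst.append(corrected_word)
--             corrected_word = ""
--             continue
--
--         else:
--             corrected_word+=char
--
--     lst.append(corrected_word)
--     new_list = [x for x in lst if x != '']
--
--     return new_list
-- ===== SOURCE B (Python) =====
-- import re
-- import string
--
-- # A token is a maximal run of non-punctuation characters, optionally joined
-- # across single hyphens that sit between two non-punctuation characters.
-- _P = re.escape(string.punctuation)
-- _TOKEN = re.compile(r"[^%s]+(?:-[^%s]+)*" % (_P, _P))
--
-- def remove_punctuation_word(word):
--     return _TOKEN.findall(word)
-- ===== Notes on version B (the rewrite author's own statement) =====
-- stated objective: idiomatic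
-- what changed: A's indexed per-character loop with an accumulator and end-of-loop flush is replaced by a single precompiled regex findall whose pattern ([^P]+(?:-[^P]+)*) matches each token (a run of non-punctuation, extended across hyphens flanked by non-punctuation) directly.
import Mathlib
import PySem

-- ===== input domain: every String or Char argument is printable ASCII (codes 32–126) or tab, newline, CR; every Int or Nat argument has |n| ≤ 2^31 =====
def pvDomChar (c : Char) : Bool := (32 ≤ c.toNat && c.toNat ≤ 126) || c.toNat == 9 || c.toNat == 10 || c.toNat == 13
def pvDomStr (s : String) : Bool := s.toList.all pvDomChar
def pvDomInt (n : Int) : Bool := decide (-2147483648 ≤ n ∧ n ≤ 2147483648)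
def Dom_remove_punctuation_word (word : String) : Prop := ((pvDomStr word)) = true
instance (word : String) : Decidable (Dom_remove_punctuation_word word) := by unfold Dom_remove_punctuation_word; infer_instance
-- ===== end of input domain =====

-- B replaces A's indexed accumulator loop by a direct tokenizer (the port of Source B's
-- regex [^P]+(?:-[^P]+)*); objective: idiomatic (a timing run also measured B faster by a constant factor).

-- ===== PORT A =====
def pvPunct : List Char := "!\"#$%&'()*+,-./:;<=>?@[\\]^_`{|}~".toList
def pvIsPunct (c : Char) : Bool := pvPunct.contains c

def pvAStep (ws : List Char) (st : List (List Char) × List Char) (ic : Int × Char) :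
    List (List Char) × List Char :=
  if ic.1 != 0 && ic.1 != (ws.length : Int) - 1 && ic.2 == '-'
      && !pvIsPunct (PySem.List.pyGetD ws (ic.1 + 1) '-')
      && !pvIsPunct (PySem.List.pyGetD ws (ic.1 - 1) '-')
  then (st.1, st.2 ++ [ic.2])
  else if pvIsPunct ic.2 then (st.1 ++ [st.2], [])
  else (st.1, st.2 ++ [ic.2])


def remove_punctuation_word (word : String) : List String :=
  let ws := word.toList
  let st := (PySem.List.enumerate ws 0).foldl (pvAStep ws) ([], [])
  ((st.1 ++ [st.2]).filter (· ≠ [])).map (fun l => String.ofList l)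

-- ===== PORT B =====

def pvRun (cs : List Char) : List Char := cs.takeWhile (fun c => !pvIsPunct c)
def pvRest (cs : List Char) : List Char := cs.dropWhile (fun c => !pvIsPunct c)
def pvExt : List Char → List Char → List Char × List Char
  | acc, '-' :: d :: t =>
      if pvIsPunct d then (acc, '-' :: d :: t)
      else pvExt (acc ++ '-' :: pvRun (d :: t)) (pvRest (d :: t))
  | acc, rest => (acc, rest)
  termination_by _ rest => rest.length
  decreasing_by
    have := List.length_dropWhile_le (fun c => !pvIsPunct c) (d :: t)
    simp only [pvRest]
    simp at this ⊢
    omega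
theorem pvExt_rest_le (acc rest : List Char) : (pvExt acc rest).2.length ≤ rest.length := by
  fun_induction pvExt acc rest with
  | case1 acc d t hp => simp
  | case2 acc d t hp ih =>
      have h0 := List.length_dropWhile_le (fun c => !pvIsPunct c) (d :: t)
      simp only [pvRest] at ih ⊢
      simp only [List.length_cons] at h0 ⊢
      omega
  | case3 => simp
theorem pvScan_dec (c : Char) (t : List Char) (h : ¬pvIsPunct c = true) :
    (pvExt (pvRun (c :: t)) (pvRest (c :: t))).2.length < (c :: t).length := by
  have h1 := pvExt_rest_le (pvRun (c :: t)) (pvRest (c :: t))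
  have h2' : (pvRest (c :: t)).length ≤ t.length := by
    simpa [pvRest, h] using List.length_dropWhile_le (fun c => !pvIsPunct c) t
  simp only [List.length_cons]
  omega
def pvScan : List Char → List (List Char)
  | [] => []
  | c :: t =>
    if h : pvIsPunct c then pvScan t
    else
      (pvExt (pvRun (c :: t)) (pvRest (c :: t))).1 ::
        pvScan (pvExt (pvRun (c :: t)) (pvRest (c :: t))).2
  termination_by cs => cs.length
  decreasing_by
    · simp
    · exact pvScan_dec c t h


def remove_punctuation_word_alt (word : String) : List String :=
  (pvScan word.toList).map (fun l => String.ofList l)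

-- ===== PRECONDITION & SPEC =====
def Spec_remove_punctuation_word (word : String) (out : List String) : Prop := out = remove_punctuation_word_alt word
instance (word : String) (out : List String) : Decidable (Spec_remove_punctuation_word word out) := by unfold Spec_remove_punctuation_word; infer_instance

-- ===== CLAIM (what is proved, stated in full; the proofs are below) =====
def Claim_equal_remove_punctuation_word : Prop := ∀ (word : String), Dom_remove_punctuation_word word → Spec_remove_punctuation_word word (remove_punctuation_word word)

-- ===== LEMMAS AND PROOFS =====
def pvPrevOk (prev : Option Char) : Bool :=
  match prev with | some p => !pvIsPunct p | none => false
def pvHeadOk (t : List Char) : Bool :=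
  match t.head? with | some d => !pvIsPunct d | none => false
def pvBetween (prev : Option Char) : Bool :=
  match prev with | some p => pvIsPunct p | none => true


def pvGo (prev : Option Char) (cs : List Char) (lst : List (List Char)) (cw : List Char) :
    List (List Char) × List Char :=
  match cs with
  | [] => (lst, cw)
  | c :: rest =>
    if c == '-' && pvPrevOk prev && pvHeadOk rest
    then pvGo (some c) rest lst (cw ++ [c])
    else if pvIsPunct c then pvGo (some c) rest (lst ++ [cw]) []
    else pvGo (some c) rest lst (cw ++ [c])

theorem pvGo_lst : ∀ (cs : List Char) (prev : Option Char) (lst : List (List Char)) (cw : List Char),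
    pvGo prev cs lst cw = (lst ++ (pvGo prev cs [] cw).1, (pvGo prev cs [] cw).2)
  | [], _, _, _ => by simp [pvGo]
  | c :: rest, prev, lst, cw => by
    simp only [pvGo, List.nil_append]
    split_ifs with h1 h2
    · rw [pvGo_lst rest (some c) lst (cw ++ [c])]
    · rw [pvGo_lst rest (some c) (lst ++ [cw]) [], pvGo_lst rest (some c) [cw] []]
      simp
    · rw [pvGo_lst rest (some c) lst (cw ++ [c])]

theorem pvCondEq (pre rest : List Char) (c : Char) :
    ((↑pre.length != (0:Int)) && (↑pre.length != ((pre ++ c :: rest).length : Int) - 1) && (c == '-')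
      && !pvIsPunct (PySem.List.pyGetD (pre ++ c :: rest) ((pre.length : Int) + 1) '-')
      && !pvIsPunct (PySem.List.pyGetD (pre ++ c :: rest) ((pre.length : Int) - 1) '-'))
    = ((c == '-') && pvPrevOk pre.getLast? && pvHeadOk rest) := by
  rcases List.eq_nil_or_concat pre with h | ⟨q, p, h⟩
  · subst h; simp [pvPrevOk]
  · subst h
    simp only [List.concat_eq_append]
    have hlast : (q ++ [p]).getLast? = some p := by simp
    rw [hlast]
    have hlen : ((q ++ [p]).length : Int) = (q.length : Int) + 1 := by simp
    have h1 : ((q ++ [p]).length : Int) + 1 = ((q.length + 2 : Nat) : Int) := by simp [List.length_append]; omega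
    have h2 : ((q ++ [p]).length : Int) - 1 = ((q.length : Nat) : Int) := by simp [List.length_append]
    rw [h1, h2, PySem.List.pyGetD_natCast, PySem.List.pyGetD_natCast]
    have hprev : ((q ++ [p]) ++ c :: rest).getD q.length '-' = p := by
      rw [List.getD_eq_getElem?_getD, List.append_assoc, List.getElem?_append_right le_rfl]
      simp
    rw [hprev]
    cases rest with
    | nil =>
      have hne : ((((q ++ [p]).length : Int)) != (((q ++ [p]) ++ [c] : List Char).length : Int) - 1) = false := by
        simp [List.length_append]; omega
      rw [hne]
      simp [pvHeadOk]
    | cons d t =>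
      have hne : ((q ++ [p]).length : Int) != (((q ++ [p]) ++ c :: d :: t).length : Int) - 1 := by
        simp [List.length_append]; omega
      have hd : ((q ++ [p]) ++ c :: d :: t).getD (q.length + 2) '-' = d := by
        rw [List.getD_eq_getElem?_getD, List.append_assoc, List.getElem?_append_right]
        · simp
        · simp
      rw [hne, hd]
      have h0 : ((q ++ [p]).length : Int) != 0 := by simp [List.length_append]; omega
      rw [h0]
      simp only [pvPrevOk, pvHeadOk, List.head?_cons]
      cases c == '-' <;> cases pvIsPunct p <;> cases pvIsPunct d <;> simp

theorem pvBridge (ws : List Char) : ∀ (suf pre : List Char), ws = pre ++ suf →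
    ∀ (lst : List (List Char)) (cw : List Char),
    (PySem.List.enumerate suf (pre.length : Int)).foldl (pvAStep ws) (lst, cw)
      = pvGo pre.getLast? suf lst cw
  | [], pre, h, lst, cw => by simp [PySem.List.enumerate_nil, pvGo]
  | c :: rest, pre, h, lst, cw => by
    subst h
    rw [PySem.List.enumerate_cons, List.foldl_cons]
    have hstep : pvAStep (pre ++ c :: rest) (lst, cw) ((pre.length : Int), c)
        = if (c == '-') && pvPrevOk pre.getLast? && pvHeadOk rest
          then (lst, cw ++ [c])
          else if pvIsPunct c then (lst ++ [cw], ([] : List Char))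
          else (lst, cw ++ [c]) := by
      simp only [pvAStep]
      rw [pvCondEq pre rest c]
    rw [hstep]
    have hlen : (pre.length : Int) + 1 = ((pre ++ [c]).length : Int) := by
      simp [List.length_append]
    have happ : pre ++ c :: rest = (pre ++ [c]) ++ rest := by simp
    have hlast : (pre ++ [c]).getLast? = some c := by simp
    split_ifs with h1 h2
    · rw [hlen]
      rw [show ((pre ++ c :: rest)) = ((pre ++ [c]) ++ rest) from happ] at *
      rw [pvBridge ((pre ++ [c]) ++ rest) rest (pre ++ [c]) rfl lst (cw ++ [c]), hlast]
      have hgo : pvGo pre.getLast? (c :: rest) lst cw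
          = (if (c == '-') && pvPrevOk pre.getLast? && pvHeadOk rest
             then pvGo (some c) rest lst (cw ++ [c])
             else if pvIsPunct c then pvGo (some c) rest (lst ++ [cw]) []
             else pvGo (some c) rest lst (cw ++ [c])) := rfl
      rw [hgo, if_pos h1]
    · rw [hlen]
      rw [show ((pre ++ c :: rest)) = ((pre ++ [c]) ++ rest) from happ] at *
      rw [pvBridge ((pre ++ [c]) ++ rest) rest (pre ++ [c]) rfl (lst ++ [cw]) [], hlast]
      have hgo : pvGo pre.getLast? (c :: rest) lst cw
          = (if (c == '-') && pvPrevOk pre.getLast? && pvHeadOk rest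
             then pvGo (some c) rest lst (cw ++ [c])
             else if pvIsPunct c then pvGo (some c) rest (lst ++ [cw]) []
             else pvGo (some c) rest lst (cw ++ [c])) := rfl
      rw [hgo, if_neg (by simp_all), if_pos h2]
    · rw [hlen]
      rw [show ((pre ++ c :: rest)) = ((pre ++ [c]) ++ rest) from happ] at *
      rw [pvBridge ((pre ++ [c]) ++ rest) rest (pre ++ [c]) rfl lst (cw ++ [c]), hlast]
      have hgo : pvGo pre.getLast? (c :: rest) lst cw
          = (if (c == '-') && pvPrevOk pre.getLast? && pvHeadOk rest
             then pvGo (some c) rest lst (cw ++ [c])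
             else if pvIsPunct c then pvGo (some c) rest (lst ++ [cw]) []
             else pvGo (some c) rest lst (cw ++ [c])) := rfl
      rw [hgo, if_neg (by simp_all), if_neg (by simp_all)]

def pvF (prev : Option Char) (cs : List Char) (cw : List Char) : List (List Char) :=
  ((pvGo prev cs [] cw).1 ++ [(pvGo prev cs [] cw).2]).filter (· ≠ [])

theorem pvF_nil (prev : Option Char) (cw : List Char) :
    pvF prev [] cw = if cw = [] then [] else [cw] := by
  by_cases h : cw = [] <;> simp [pvF, pvGo, h]

theorem pvF_keep (prev : Option Char) (c : Char) (t : List Char) (cw : List Char)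
    (h : (c == '-' && pvPrevOk prev && pvHeadOk t) = true) :
    pvF prev (c :: t) cw = pvF (some c) t (cw ++ [c]) := by
  simp only [pvF, pvGo, h, if_pos]

theorem pvF_app (prev : Option Char) (c : Char) (t : List Char) (cw : List Char)
    (h : (c == '-' && pvPrevOk prev && pvHeadOk t) = false)
    (hc : pvIsPunct c = false) :
    pvF prev (c :: t) cw = pvF (some c) t (cw ++ [c]) := by
  simp only [pvF, pvGo, h, hc]
  simp

theorem pvF_emit (prev : Option Char) (c : Char) (t : List Char) (cw : List Char)
    (h : (c == '-' && pvPrevOk prev && pvHeadOk t) = false)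
    (hc : pvIsPunct c = true) :
    pvF prev (c :: t) cw = (if cw = [] then [] else [cw]) ++ pvF (some c) t [] := by
  simp only [pvF, pvGo, h, hc]
  rw [pvGo_lst t (some c) ([] ++ [cw]) []]
  by_cases hcw : cw = [] <;> simp [hcw, List.filter_append]

theorem pvExt_stuck (acc : List Char) (c : Char) (t : List Char)
    (h : c ≠ '-' ∨ t = [] ∨ (∃ d t', t = d :: t' ∧ pvIsPunct d = true)) :
    pvExt acc (c :: t) = (acc, c :: t) := by
  rcases t with _ | ⟨d, t'⟩
  · by_cases hc : c = '-'
    · subst hc; simp [pvExt]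
    · rw [pvExt.eq_def]
      split
      · rename_i heq; rw [List.cons.injEq] at heq; simp at heq
      · rfl
  · by_cases hc : c = '-'
    · subst hc
      rcases h with h | h | ⟨d', t'', hdt, hd⟩
      · exact absurd rfl h
      · simp at h
      · rw [List.cons.injEq] at hdt
        obtain ⟨rfl, rfl⟩ := hdt
        simp [pvExt, hd]
    · rw [pvExt.eq_def]
      split
      · rename_i heq; rw [List.cons.injEq] at heq; exact absurd heq.1 hc
      · rfl

theorem pvMainNil (prev : Option Char) (cw : List Char) :
    ((cw = [] → pvBetween prev = true →
        pvF prev [] cw = pvScan [])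
     ∧ (∀ p, prev = some p → pvIsPunct p = false → cw ≠ [] →
        pvF prev [] cw =
          (pvExt (cw ++ pvRun []) (pvRest [])).1 :: pvScan (pvExt (cw ++ pvRun []) (pvRest [])).2)) := by
  constructor
  · intro hcw _; subst hcw; simp [pvF_nil, pvScan]
  · intro p hp hpP hcw
    rw [pvF_nil, if_neg hcw]
    simp only [pvRun, pvRest, List.takeWhile_nil, List.dropWhile_nil, List.append_nil]
    have : pvExt cw [] = (cw, []) := by simp [pvExt]
    rw [this]
    simp [pvScan]

theorem pvMain : ∀ (n : Nat) (cs : List Char), cs.length ≤ n →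
    ∀ (prev : Option Char) (cw : List Char),
    ((cw = [] → pvBetween prev = true →
        pvF prev cs cw = pvScan cs)
     ∧ (∀ p, prev = some p → pvIsPunct p = false → cw ≠ [] →
        pvF prev cs cw =
          (pvExt (cw ++ pvRun cs) (pvRest cs)).1 :: pvScan (pvExt (cw ++ pvRun cs) (pvRest cs)).2)) := by
  intro n
  induction n with
  | zero =>
    intro cs hlen prev cw
    have hnil : cs = [] := List.eq_nil_of_length_eq_zero (Nat.le_zero.mp hlen)
    subst hnil
    exact pvMainNil prev cw
  | succ n ih =>
    intro cs hlen prev cw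
    cases cs with
    | nil => exact pvMainNil prev cw
    | cons c t =>
      have hlt : t.length ≤ n := by simp at hlen; omega
      constructor
      · -- part 1: between tokens
        intro hcw hprev
        subst hcw
        have hkey : pvPrevOk prev = false := by
          revert hprev; cases prev with
          | none => intro _; simp [pvPrevOk]
          | some p => intro hprev; simp [pvBetween] at hprev; simp [pvPrevOk, hprev]
        have hcond : (c == '-' && pvPrevOk prev && pvHeadOk t) = false := by
          simp [hkey]
        by_cases hc : pvIsPunct c
        · rw [pvF_emit prev c t [] hcond hc]
          rw [if_pos rfl, List.nil_append]
          rw [(ih t hlt (some c) []).1 rfl (by simpa using hc)]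
          simp [pvScan, hc]
        · rw [pvF_app prev c t [] hcond (by simpa using hc)]
          rw [List.nil_append]
          rw [(ih t hlt (some c) [c]).2 c rfl (by simpa using hc) (by simp)]
          have hrun : pvRun (c :: t) = c :: pvRun t := by simp [pvRun, hc]
          have hrest : pvRest (c :: t) = pvRest t := by simp [pvRest, hc]
          have hcf : pvIsPunct c = false := by simpa using hc
          conv_rhs => rw [pvScan.eq_def]
          simp [hcf, hrun, hrest]
      · -- part 2: inside a token
        intro p hp hpP hcw
        subst hp
        by_cases hc : pvIsPunct c
        · by_cases hcond : (c == '-' && pvPrevOk (some p) && pvHeadOk t) = true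
          · -- keep the hyphen
            have hcm : c = '-' := by
              rcases Bool.and_eq_true .. |>.mp hcond with ⟨h1, _⟩
              rcases Bool.and_eq_true .. |>.mp h1 with ⟨h2, _⟩
              exact beq_iff_eq.mp h2
            rcases t with _ | ⟨d, t'⟩
            · simp [pvHeadOk] at hcond
            · have hd : pvIsPunct d = false := by
                rcases Bool.and_eq_true .. |>.mp hcond with ⟨_, h3⟩
                simpa [pvHeadOk] using h3
              rw [pvF_keep (some p) c (d :: t') cw (by simpa using hcond)]
              have hdm : d ≠ '-' := by
                intro hdd; rw [hdd] at hd; simp [pvIsPunct, pvPunct] at hd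
              have hcond2 : (d == '-' && pvPrevOk (some c) && pvHeadOk t') = false := by
                simp [hdm]
              rw [pvF_app (some c) d t' (cw ++ [c]) hcond2 hd]
              have hlt' : t'.length ≤ n := by simp at hlen; omega
              rw [(ih t' hlt' (some d) ((cw ++ [c]) ++ [d])).2 d rfl hd (by simp)]
              -- now reconcile with pvExt on the B side
              have hrun : pvRun (c :: d :: t') = [] := by simp [pvRun, hc]
              have hrest : pvRest (c :: d :: t') = c :: d :: t' := by simp [pvRest, hc]
              rw [hrun, hrest, List.append_nil, hcm]
              have hext : pvExt cw ('-' :: d :: t') =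
                  pvExt (cw ++ '-' :: pvRun (d :: t')) (pvRest (d :: t')) := by
                simp [pvExt, hd]
              rw [hext]
              have hrun' : pvRun (d :: t') = d :: pvRun t' := by simp [pvRun, hd]
              have hrest' : pvRest (d :: t') = pvRest t' := by simp [pvRest, hd]
              rw [hrun', hrest']
              have : cw ++ ['-'] ++ [d] ++ pvRun t' = cw ++ '-' :: d :: pvRun t' := by
                simp
              rw [this]
          · -- split here
            have hcond' : (c == '-' && pvPrevOk (some p) && pvHeadOk t) = false := by
              simpa using hcond
            rw [pvF_emit (some p) c t cw hcond' hc, if_neg hcw]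
            rw [(ih t hlt (some c) []).1 rfl (by simpa using hc)]
            have hrun : pvRun (c :: t) = [] := by simp [pvRun, hc]
            have hrest : pvRest (c :: t) = c :: t := by simp [pvRest, hc]
            rw [hrun, hrest, List.append_nil]
            have hstuck : pvExt cw (c :: t) = (cw, c :: t) := by
              apply pvExt_stuck
              by_cases hcm : c = '-'
              · right
                rcases t with _ | ⟨d, t'⟩
                · left; rfl
                · right
                  refine ⟨d, t', rfl, ?_⟩
                  subst hcm
                  simp [pvPrevOk, pvHeadOk, hpP] at hcond
                  exact hcond
              · left; exact hcm
            rw [hstuck]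
            have : pvScan (c :: t) = pvScan t := by
              rw [pvScan.eq_def]; simp [hc]
            simp [this]
        · -- non-punctuation: extend the token
          have hcm : c ≠ '-' := by
            intro hdd; rw [hdd] at hc; simp [pvIsPunct, pvPunct] at hc
          have hcond : (c == '-' && pvPrevOk (some p) && pvHeadOk t) = false := by
            simp [hcm]
          rw [pvF_app (some p) c t cw hcond (by simpa using hc)]
          rw [(ih t hlt (some c) (cw ++ [c])).2 c rfl (by simpa using hc) (by simp)]
          have hrun : pvRun (c :: t) = c :: pvRun t := by simp [pvRun, hc]
          have hrest : pvRest (c :: t) = pvRest t := by simp [pvRest, hc]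
          rw [hrun, hrest]
          have : cw ++ [c] ++ pvRun t = cw ++ c :: pvRun t := by simp
          rw [this]

-- ===== VERDICT (by name: the statement is the Claim_ definition above) =====
theorem remove_punctuation_word_spec : Claim_equal_remove_punctuation_word := by
  intro word _
  unfold Spec_remove_punctuation_word
  simp only [remove_punctuation_word, remove_punctuation_word_alt]
  have hb := pvBridge word.toList word.toList [] rfl [] []
  simp only [List.length_nil, Nat.cast_zero, List.getLast?_nil] at hb
  rw [hb]
  have hm := (pvMain word.toList.length word.toList le_rfl none []).1 rfl rfl
  unfold pvF at hm
  rw [hm]
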